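-- pv_equiv track=rewrite | github.com/imramesh222/ai_management_system | api/views.py | most_frequent_vowel_and_consonant
-- ===== SOURCE A (Python) =====
-- from typing import List
-- import string
--
-- def most_frequent_vowel_and_consonant(s: str) -> List[str]:
--     s = s.lower()
--     vowels = 'aeiou'
--     freq_vowel = {}
--     freq_consonant = {}
--     for ch in s:
--         if ch in string.ascii_lowercase:
--             if ch in vowels:
--                 freq_vowel[ch] = freq_vowel.get(ch, 0) + 1
--             else:
--                 freq_consonant[ch] = freq_consonant.get(ch, 0) + 1
--     most_vowel = min(
--         (k for k, v in freq_vowel.items() if v == max(freq_vowel.values(), default=0)),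
--         default='',
--     ) if freq_vowel else ''
--     most_consonant = min(
--         (k for k, v in freq_consonant.items() if v == max(freq_consonant.values(), default=0)),
--         default='',
--     ) if freq_consonant else ''
--     return [most_vowel, most_consonant]
-- ===== SOURCE B (Python) =====
-- from typing import List
--
--
-- def most_frequent_vowel_and_consonant(s: str) -> List[str]:
--     t = s.lower()
--
--     def best(candidates: str) -> str:
--         b, bc = '', 0
--         for ch in candidates:
--             c = sum(x == ch for x in t)
--             if c > bc:
--                 b, bc = ch, c
--         return b
--
--     return [best('aeiou'), best('bcdfghjklmnpqrstvwxyz')]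
-- ===== Notes on version B (the rewrite author's own statement) =====
-- stated objective: simpler
-- what changed: B drops A's two frequency dicts and max-then-min-filter selection: for each of the two fixed alphabetical candidate letter lists it does a single scan keeping the strictly-greater running best (first tie wins, i.e. alphabetically smallest), counting each candidate's occurrences directly.
import Mathlib
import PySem

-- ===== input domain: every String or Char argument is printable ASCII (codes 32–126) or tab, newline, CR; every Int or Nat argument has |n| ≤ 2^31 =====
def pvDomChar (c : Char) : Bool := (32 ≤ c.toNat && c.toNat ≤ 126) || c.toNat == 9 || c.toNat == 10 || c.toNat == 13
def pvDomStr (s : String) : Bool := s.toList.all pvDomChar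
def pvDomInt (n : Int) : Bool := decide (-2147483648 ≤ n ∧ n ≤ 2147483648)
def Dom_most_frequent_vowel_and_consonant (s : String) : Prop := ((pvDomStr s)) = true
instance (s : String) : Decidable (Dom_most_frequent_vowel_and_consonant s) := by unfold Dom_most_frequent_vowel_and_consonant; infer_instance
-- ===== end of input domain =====

-- B replaces A's two frequency dicts + max-then-min-filter selection by a single strictly-greater
-- scan over each fixed alphabetical candidate list, counting occurrences directly (objective: simpler).

-- ===== PORT A =====
-- string.ascii_lowercase as a char list
def pvAsciiLower : List Char :=
  ['a','b','c','d','e','f','g','h','i','j','k','l','m','n','o','p','q','r','s','t','u','v','w','x','y','z']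
-- vowels = 'aeiou'
def pvVowels : List Char := ['a','e','i','o','u']

-- port of A's selection expression, applied once per dict:
--   min((k for k, v in freq.items() if v == max(freq.values(), default=0)), default='') if freq else ''
-- (the max(...) subexpression is constant over the generator, computed once; single-char Python
-- strings compare exactly like Chars by codepoint)
def pvPickMost (d : PySem.Dict Char Int) : String :=
  if d.size = 0 then ""
  else
    let m : Int := (PySem.List.max? d.values (fun v => v)).getD 0
    match PySem.List.min? ((d.items.filter (fun kv => kv.2 == m)).map (fun kv => kv.1)) (fun k => k) with
    | some k => k.toString
    | none => ""

def most_frequent_vowel_and_consonant (s : String) : List String :=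
  let t := (PySem.Str.lower s).toList
  -- the for-loop over s building freq_vowel / freq_consonant; 'ch in string.ascii_lowercase' and
  -- 'ch in vowels' are single-char substring tests, i.e. membership
  let fr := t.foldl
    (fun (st : PySem.Dict Char Int × PySem.Dict Char Int) ch =>
      if pvAsciiLower.contains ch then
        if pvVowels.contains ch then (st.1.insert ch (st.1.getD ch 0 + 1), st.2)
        else (st.1, st.2.insert ch (st.2.getD ch 0 + 1))
      else st)
    (PySem.Dict.empty, PySem.Dict.empty)
  [pvPickMost fr.1, pvPickMost fr.2]

-- ===== PORT B =====
-- 'bcdfghjklmnpqrstvwxyz'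
def pvConsonants : List Char :=
  ['b','c','d','f','g','h','j','k','l','m','n','p','q','r','s','t','v','w','x','y','z']

-- port of Source B's best(candidates): strictly-greater scan, first tie wins;
-- sum(x == ch for x in t) is the 0/1 sum over t (True == 1)
def pvBest (t : List Char) (candidates : List Char) : String :=
  (candidates.foldl
    (fun (acc : String × Int) ch =>
      let c : Int := (t.map (fun x => if x == ch then (1 : Int) else 0)).sum
      if c > acc.2 then (ch.toString, c) else acc)
    ("", 0)).1

def most_frequent_vowel_and_consonant_alt (s : String) : List String :=
  let t := (PySem.Str.lower s).toList
  [pvBest t pvVowels, pvBest t pvConsonants]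

-- ===== PRECONDITION & SPEC =====
def Spec_most_frequent_vowel_and_consonant (s : String) (out : List String) : Prop := out = most_frequent_vowel_and_consonant_alt s
instance (s : String) (out : List String) : Decidable (Spec_most_frequent_vowel_and_consonant s out) := by unfold Spec_most_frequent_vowel_and_consonant; infer_instance

-- ===== CLAIM (what is proved, stated in full; the proofs are below) =====
def Claim_equal_most_frequent_vowel_and_consonant : Prop := ∀ (s : String), Dom_most_frequent_vowel_and_consonant s → Spec_most_frequent_vowel_and_consonant s (most_frequent_vowel_and_consonant s)

-- ===== LEMMAS AND PROOFS =====

-- the count B computes for a candidate, as an Int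
def pvCnt (t : List Char) (ch : Char) : Int := (t.count ch : Int)

-- the running maximum B's scan reaches
def pvM (t : List Char) (L : List Char) : Int := L.foldl (fun m ch => max m (pvCnt t ch)) 0

-- the two dict-building loops of A, separated
def pvStep (p : Char → Bool) (d : PySem.Dict Char Int) (ch : Char) : PySem.Dict Char Int :=
  if p ch then d.insert ch (d.getD ch 0 + 1) else d

def pvPV (ch : Char) : Bool := pvAsciiLower.contains ch && pvVowels.contains ch
def pvPC (ch : Char) : Bool := pvAsciiLower.contains ch && !(pvVowels.contains ch)

lemma pv_loop_split (t : List Char) :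
    ∀ (d1 d2 : PySem.Dict Char Int),
      t.foldl
        (fun (st : PySem.Dict Char Int × PySem.Dict Char Int) ch =>
          if pvAsciiLower.contains ch then
            if pvVowels.contains ch then (st.1.insert ch (st.1.getD ch 0 + 1), st.2)
            else (st.1, st.2.insert ch (st.2.getD ch 0 + 1))
          else st)
        (d1, d2)
      = (t.foldl (pvStep pvPV) d1, t.foldl (pvStep pvPC) d2) := by
  induction t with
  | nil => intro d1 d2; rfl
  | cons ch t ih =>
    intro d1 d2
    simp only [List.foldl_cons]
    cases h1 : pvAsciiLower.contains ch with
    | true =>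
      cases h2 : pvVowels.contains ch with
      | true =>
        simp only [pvStep, pvPV, pvPC, h1, h2, Bool.not_true, Bool.and_false,
          Bool.and_true, if_true]
        exact ih _ _
      | false =>
        simp only [pvStep, pvPV, pvPC, h1, h2, Bool.not_false, Bool.and_false,
          Bool.and_true, if_true]
        exact ih _ _
    | false =>
      simp only [pvStep, pvPV, pvPC, h1, Bool.false_and]
      exact ih _ _

-- characterisation of B's scan
lemma pv_attained (t : List Char) : ∀ (L : List Char) (a : Int),
    L.foldl (fun m ch => max m (pvCnt t ch)) a = a ∨
      ∃ ch ∈ L, L.foldl (fun m ch => max m (pvCnt t ch)) a = pvCnt t ch := by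
  intro L
  induction L with
  | nil => intro a; left; rfl
  | cons x L ih =>
    intro a
    simp only [List.foldl_cons]
    rcases ih (max a (pvCnt t x)) with h | ⟨ch, hm, h⟩
    · rcases max_choice a (pvCnt t x) with hc | hc
      · left; rw [h, hc]
      · right; exact ⟨x, by simp, by rw [h, hc]⟩
    · right; exact ⟨ch, by simp [hm], h⟩

lemma pv_run_spec (t : List Char) (L : List Char) :
    L.foldl
      (fun (acc : String × Int) ch =>
        let c : Int := (t.map (fun x => if x == ch then (1 : Int) else 0)).sum
        if c > acc.2 then (ch.toString, c) else acc)
      ("", 0)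
    = (if pvM t L = 0 then ""
       else match L.find? (fun ch => pvCnt t ch == pvM t L) with
            | some c => c.toString
            | none => "", pvM t L) := by
  have hcnt : ∀ ch : Char, ((t.map (fun x => if x == ch then (1 : Int) else 0)).sum) = pvCnt t ch := by
    intro ch
    rw [PySem.List.sum_map_ite_one_zero]
    simp [pvCnt, List.count]
  induction L using List.reverseRecOn with
  | nil => simp [pvM]
  | append_singleton L x ih =>
    have hM : pvM t (L ++ [x]) = max (pvM t L) (pvCnt t x) := by
      simp [pvM, List.foldl_append]
    have hM0 : (0 : Int) ≤ pvM t L := (PySem.List.le_foldl_max_int L (pvCnt t) 0).1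
    have hle : ∀ ch ∈ L, pvCnt t ch ≤ pvM t L := (PySem.List.le_foldl_max_int L (pvCnt t) 0).2
    rw [List.foldl_append, ih]
    simp only [List.foldl_cons, List.foldl_nil, hcnt]
    by_cases hgt : pvCnt t x > pvM t L
    · rw [if_pos hgt]
      have hMx : pvM t (L ++ [x]) = pvCnt t x := by rw [hM]; exact max_eq_right (le_of_lt hgt)
      have hxpos : pvM t (L ++ [x]) ≠ 0 := by rw [hMx]; omega
      have hnone : L.find? (fun ch => pvCnt t ch == pvM t (L ++ [x])) = none := by
        rw [List.find?_eq_none]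
        intro ch hch
        simp only [beq_iff_eq]
        have := hle ch hch
        omega
      rw [List.find?_append, hnone, Option.none_or]
      rw [if_neg hxpos, hMx]
      simp
    · rw [not_lt] at hgt
      have hMx : pvM t (L ++ [x]) = pvM t L := by rw [hM]; exact max_eq_left hgt
      rw [if_neg (by omega)]
      rw [hMx]
      by_cases h0 : pvM t L = 0
      · simp [h0]
      · rw [if_neg h0, if_neg h0]
        have hsome : (L.find? (fun ch => pvCnt t ch == pvM t L)).isSome = true := by
          rw [List.find?_isSome]
          rcases pv_attained t L 0 with h | ⟨ch, hch, h⟩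
          · exact absurd (show pvM t L = 0 from h) h0
          · exact ⟨ch, hch, by simp only [pvM]; rw [h]; simp⟩
        obtain ⟨c, hc⟩ := Option.isSome_iff_exists.mp hsome
        rw [List.find?_append, hc, Option.some_or]

-- first hit of find? in a strictly sorted list is minimal among hits
lemma pv_find?_sorted_min {L : List Char} (hs : L.Pairwise (· < ·)) {q : Char → Bool} {c : Char}
    (h : L.find? q = some c) : ∀ d ∈ L, q d = true → c ≤ d := by
  induction L with
  | nil => intro d hd; simp at hd
  | cons a L ih =>
    intro d hd hq
    rcases List.pairwise_cons.mp hs with ⟨ha, hs'⟩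
    rw [List.find?_cons] at h
    by_cases hqa : q a = true
    · simp [hqa] at h
      subst h
      rcases List.mem_cons.mp hd with rfl | hd'
      · exact le_refl _
      · exact le_of_lt (ha d hd')
    · simp [hqa] at h
      rcases List.mem_cons.mp hd with rfl | hd'
      · exact absurd hq hqa
      · exact ih hs' h d hd' hq

-- the central lemma: A's dict-based pick equals B's scan, per category
lemma pv_pick_eq (t L : List Char) (p : Char → Bool)
    (hsort : L.Pairwise (· < ·))
    (hmem : ∀ ch, p ch = true ↔ ch ∈ L) :
    pvPickMost (t.foldl (pvStep p) PySem.Dict.empty) = pvBest t L := by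
  have hfold : t.foldl (pvStep p) PySem.Dict.empty
      = (t.filter p).foldl (fun d ch => d.insert ch (d.getD ch 0 + 1)) PySem.Dict.empty :=
    PySem.List.foldl_if_eq_foldl_filter p _ t _
  rw [hfold]
  set V := t.filter p with hV
  set D : PySem.Dict Char Int := V.foldl (fun d ch => d.insert ch (d.getD ch 0 + 1)) PySem.Dict.empty with hD
  have hg : ∀ k, D.getD k 0 = (V.count k : Int) := by
    intro k
    rw [hD]
    simpa using PySem.Dict.getD_foldl_insert_add_one V PySem.Dict.empty k
  have hnd : D.keys.Nodup := by
    rw [hD]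
    exact PySem.Dict.nodup_keys_foldl_insert V _ PySem.Dict.empty (by simp [PySem.Dict.keys_empty])
  have hkeys : ∀ k, k ∈ D.keys ↔ k ∈ V := by
    intro k
    rw [hD, PySem.Dict.keys_foldl_insert]
    exact PySem.Set.mem_ofList V k
  have hVL : ∀ k, k ∈ V → k ∈ L := fun k hk => (hmem k).mp (List.of_mem_filter hk)
  have hcntV : ∀ k ∈ L, pvCnt t k = (V.count k : Int) := by
    intro k hk
    rw [hV, pvCnt, List.count_filter ((hmem k).mpr hk)]
  have hgc : ∀ k ∈ D.keys, D.getD k 0 = pvCnt t k := by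
    intro k hk
    rw [hg k]
    exact (hcntV k (hVL k ((hkeys k).mp hk))).symm
  have hbest : pvBest t L =
      (if pvM t L = 0 then ""
       else match L.find? (fun ch => pvCnt t ch == pvM t L) with
            | some c => c.toString
            | none => "") := by
    simp only [pvBest, pv_run_spec]
  by_cases hVnil : V = []
  · have hDe : D = PySem.Dict.empty := by rw [hD, hVnil]; rfl
    have hM0 : pvM t L = 0 := by
      have hz : ∀ ch ∈ L, pvCnt t ch = 0 := by
        intro ch hch
        rw [hcntV ch hch, hVnil]
        simp
      rcases pv_attained t L 0 with h | ⟨ch, hch, h⟩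
      · exact h
      · have : pvM t L = pvCnt t ch := h
        rw [this, hz ch hch]
    rw [hDe, hbest, if_pos hM0]
    simp [pvPickMost, PySem.Dict.size_empty]
  · obtain ⟨v0, hv0⟩ := List.exists_mem_of_ne_nil V hVnil
    have hv0K : v0 ∈ D.keys := (hkeys v0).mpr hv0
    have hKne : D.keys ≠ [] := fun h => by simp [h] at hv0K
    have hle : ∀ ch ∈ L, pvCnt t ch ≤ pvM t L := (PySem.List.le_foldl_max_int L (pvCnt t) 0).2
    have hMpos : 0 < pvM t L := by
      have h1 : (1 : Int) ≤ pvCnt t v0 := by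
        rw [hcntV v0 (hVL v0 hv0)]
        have := List.count_pos_iff.mpr hv0
        omega
      have h2 : pvCnt t v0 ≤ pvM t L := hle v0 (hVL v0 hv0)
      omega
    have hmemK' : ∀ ch ∈ L, 0 < pvCnt t ch → ch ∈ D.keys := by
      intro ch hchL hpos
      refine (hkeys ch).mpr (List.mem_filter.mpr ⟨?_, (hmem ch).mpr hchL⟩)
      have hpos' : (0 : Int) < (t.count ch : Int) := by simpa [pvCnt] using hpos
      exact List.count_pos_iff.mp (by exact_mod_cast hpos')
    have hvals : D.values = D.keys.map (fun k => D.getD k 0) := PySem.Dict.values_eq_map_keys D hnd 0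
    have hvne : D.values ≠ [] := by
      rw [hvals]
      simp [hKne]
    obtain ⟨m0, hm0⟩ : ∃ m0, PySem.List.max? D.values (fun v => v) = some m0 := by
      cases hmx : PySem.List.max? D.values (fun v => v) with
      | none => exact absurd ((PySem.List.max?_eq_none_iff _ _).mp hmx) hvne
      | some m => exact ⟨m, rfl⟩
    have hm0max : ∀ y ∈ D.values, y ≤ m0 := PySem.List.max?_isMax hm0
    have hex : ∃ ch ∈ L, pvCnt t ch = pvM t L := by
      rcases pv_attained t L 0 with h | ⟨ch, hch, h⟩
      · exact absurd (show pvM t L = 0 from h) (by omega)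
      · exact ⟨ch, hch, (show pvM t L = pvCnt t ch from h).symm⟩
    obtain ⟨chm, hchmL, hchm⟩ := hex
    have hchmK : chm ∈ D.keys := hmemK' chm hchmL (by omega)
    have hm0eq : m0 = pvM t L := by
      have hm0mem := PySem.List.max?_mem hm0
      rw [hvals] at hm0mem
      obtain ⟨k0, hk0K, he⟩ := List.mem_map.mp hm0mem
      have hk0L := hVL k0 ((hkeys k0).mp hk0K)
      have hle1 : m0 ≤ pvM t L := by
        rw [← he, hgc k0 hk0K]
        exact hle k0 hk0L
      have hge1 : pvM t L ≤ m0 := by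
        have : D.getD chm 0 ∈ D.values := by
          rw [hvals]
          exact List.mem_map.mpr ⟨chm, hchmK, rfl⟩
        have h3 := hm0max _ this
        rw [hgc chm hchmK, hchm] at h3
        exact h3
      omega
    -- reduce A's pick to a min? over the filtered key list
    have hitems := PySem.Dict.items_eq_map_keys D hnd 0
    have hsz : ¬ D.size = 0 := by
      have hsz' : D.size = D.keys.length := by
        rw [show D.size = D.items.length from rfl, hitems, List.length_map]
      rw [hsz']
      simpa using hKne
    have hks : (D.items.filter (fun kv => kv.2 == m0)).map (fun kv => kv.1)
        = D.keys.filter (fun k => D.getD k 0 == m0) := by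
      rw [hitems, List.filter_map, List.map_map]
      simp [Function.comp_def]
    have hchmks : chm ∈ D.keys.filter (fun k => D.getD k 0 == m0) := by
      refine List.mem_filter.mpr ⟨hchmK, ?_⟩
      rw [hgc chm hchmK, hchm, hm0eq]
      simp
    obtain ⟨kmin, hkmin⟩ :
        ∃ kmin, PySem.List.min? (D.keys.filter (fun k => D.getD k 0 == m0)) (fun k => k) = some kmin := by
      cases hmn : PySem.List.min? (D.keys.filter (fun k => D.getD k 0 == m0)) (fun k => k) with
      | none =>
        rw [PySem.List.min?_eq_none_iff] at hmn
        rw [hmn] at hchmks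
        simp at hchmks
      | some k => exact ⟨k, rfl⟩
    have hkminks := PySem.List.min?_mem hkmin
    have hkminK : kmin ∈ D.keys := (List.mem_filter.mp hkminks).1
    have hkminM : pvCnt t kmin = pvM t L := by
      have := (List.mem_filter.mp hkminks).2
      rw [hgc kmin hkminK] at this
      rw [← hm0eq]
      exact beq_iff_eq.mp this
    obtain ⟨c, hcfind⟩ : ∃ c, L.find? (fun ch => pvCnt t ch == pvM t L) = some c := by
      have hsome : (L.find? (fun ch => pvCnt t ch == pvM t L)).isSome = true := by
        rw [List.find?_isSome]
        exact ⟨chm, hchmL, by rw [hchm]; simp⟩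
      exact Option.isSome_iff_exists.mp hsome
    have hcL := List.mem_of_find?_eq_some hcfind
    have hcM : pvCnt t c = pvM t L := by simpa using List.find?_some hcfind
    have hceq : c = kmin := by
      have h1 : c ≤ kmin := by
        refine pv_find?_sorted_min hsort hcfind kmin (hVL kmin ((hkeys kmin).mp hkminK)) ?_
        rw [hkminM]
        simp
      have h2 : kmin ≤ c := by
        have hcks : c ∈ D.keys.filter (fun k => D.getD k 0 == m0) := by
          have hcK : c ∈ D.keys := hmemK' c hcL (by omega)
          refine List.mem_filter.mpr ⟨hcK, ?_⟩
          rw [hgc c hcK, hcM, hm0eq]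
          simp
        exact PySem.List.min?_isMin hkmin c hcks
      exact le_antisymm h1 h2
    rw [hbest, if_neg (by omega), hcfind, hceq]
    simp only [pvPickMost, hm0, Option.getD_some, hks]
    rw [if_neg hsz, hkmin]

-- ===== VERDICT (by name: the statement is the Claim_ definition above) =====
theorem most_frequent_vowel_and_consonant_spec : Claim_equal_most_frequent_vowel_and_consonant := by
  intro s _
  unfold Spec_most_frequent_vowel_and_consonant
  unfold most_frequent_vowel_and_consonant most_frequent_vowel_and_consonant_alt
  simp only [pv_loop_split]
  have hv : ∀ ch, pvPV ch = true ↔ ch ∈ pvVowels := by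
    intro ch
    constructor
    · intro h
      exact List.contains_iff_mem.mp (Bool.and_elim_right h)
    · intro h
      have : ∀ c ∈ pvVowels, pvPV c = true := by
        intro c hcm; fin_cases hcm <;> decide
      exact this ch h
  have hc : ∀ ch, pvPC ch = true ↔ ch ∈ pvConsonants := by
    intro ch
    constructor
    · intro h
      have h1 : ch ∈ pvAsciiLower := List.contains_iff_mem.mp (Bool.and_elim_left h)
      have h2 : pvVowels.contains ch = false := by
        have := Bool.and_elim_right h; simpa using this
      have : ∀ c ∈ pvAsciiLower, pvVowels.contains c = false → c ∈ pvConsonants := by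
        intro c hcm; fin_cases hcm <;> decide
      exact this ch h1 h2
    · intro h
      have : ∀ c ∈ pvConsonants, pvPC c = true := by
        intro c hcm; fin_cases hcm <;> decide
      exact this ch h
  rw [pv_pick_eq ((PySem.Str.lower s).toList) pvVowels pvPV (by decide) hv,
     pv_pick_eq ((PySem.Str.lower s).toList) pvConsonants pvPC (by decide) hc]
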